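-- pv_equiv track=rewrite | github.com/itscomputers/ebe-python | numth/primality.py | _lucas_sequence_by_index
-- ===== SOURCE A (Python) =====
-- def _lucas_double_index(U, V, Q, mod):
--     """
--     Shortcut to double the index of a Lucas sequence.
--
--     Args:   int:    U, V, Q, mod
--
--     Return: tuple
--     """
--     return (
--         (U*V) % mod,
--         (V*V - 2*Q) % mod,
--         (Q**2) % mod
--     )
--
-- def _lucas_index_plus_one(U, V, P, Q, Q1, mod):
--     """
--     Shortcut to increase the index of a Lucas sequence by one.
--
--     Args:   int:    U, V, P, Q, Q1, mod
--
--     Return: tuple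
--     """
--     return (
--         ((P*U + V) * (mod + 1)//2) % mod,
--         (((P**2 - 4*Q1)*U + P*V) * (mod + 1)//2) % mod,
--         (Q*Q1) % mod
--     )
--
-- def _lucas_sequence_by_index(k, P, Q, mod):
--     """
--     Explicit formula for any element of a Lucas sequence.
--
--     Args:   int:    k, P, Q, mod
--
--     Return: tuple:  (U[k], V[k], Q**k)
--     """
--     if k == 0:
--         return (0, 2, 1)
--     elif k == 1:
--         return (1, P, Q)
--     elif k % 2 == 0:
--         U_, V_, Q_ = _lucas_sequence_by_index(k//2, P, Q, mod)
--         return _lucas_double_index(U_, V_, Q_, mod)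
--     else:
--         U_, V_, Q_ = _lucas_sequence_by_index(k-1, P, Q, mod)
--         return _lucas_index_plus_one(U_, V_, P, Q_, Q, mod)
-- ===== SOURCE B (Python) =====
-- def _lucas_double_index(U, V, Q, mod):
--     return (
--         (U*V) % mod,
--         (V*V - 2*Q) % mod,
--         (Q**2) % mod
--     )
--
-- def _lucas_index_plus_one(U, V, P, Q, Q1, mod):
--     return (
--         ((P*U + V) * (mod + 1)//2) % mod,
--         (((P**2 - 4*Q1)*U + P*V) * (mod + 1)//2) % mod,
--         (Q*Q1) % mod
--     )
--
-- def _lucas_sequence_by_index(k, P, Q, mod):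
--     if k == 0:
--         return (0, 2, 1)
--     U, V, Qk = 1, P, Q
--     for bit in bin(k)[3:]:
--         U, V, Qk = _lucas_double_index(U, V, Qk, mod)
--         if bit == '1':
--             U, V, Qk = _lucas_index_plus_one(U, V, P, Qk, Q, mod)
--     return (U, V, Qk)
-- ===== Notes on version B (the rewrite author's own statement) =====
-- stated objective: alternative
-- what changed: Replaced the naive recursion on k (halve when even, decrement when odd) by an iterative fast-doubling loop over the bits of k from the most significant bit down, with an explicit (U,V,Qk) accumulator and no recursion.
import Mathlib
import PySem

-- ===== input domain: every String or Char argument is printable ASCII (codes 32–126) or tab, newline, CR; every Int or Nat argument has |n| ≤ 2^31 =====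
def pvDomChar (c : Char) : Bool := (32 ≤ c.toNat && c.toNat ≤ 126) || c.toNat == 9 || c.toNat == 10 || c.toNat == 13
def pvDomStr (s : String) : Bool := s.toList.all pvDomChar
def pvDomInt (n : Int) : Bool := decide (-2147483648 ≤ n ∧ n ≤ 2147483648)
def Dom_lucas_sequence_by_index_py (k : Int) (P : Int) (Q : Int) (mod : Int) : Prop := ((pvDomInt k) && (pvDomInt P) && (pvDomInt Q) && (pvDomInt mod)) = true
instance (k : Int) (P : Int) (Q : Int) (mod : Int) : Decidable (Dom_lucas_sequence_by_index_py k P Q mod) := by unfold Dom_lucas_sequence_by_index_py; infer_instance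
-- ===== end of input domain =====

-- B replaces A's naive recursion on k by an iterative fast-doubling loop over the bits of k
-- (most significant bit first), same Lucas-step formulas; objective: alternative decomposition.

-- ===== PORT A =====
-- helper _lucas_double_index (shared by both Pythons)
def pvLucasDouble (U : Int) (V : Int) (Q : Int) (mod : Int) : Int × Int × Int :=
  (PySem.Int.mod (U * V) mod,
   PySem.Int.mod (V * V - 2 * Q) mod,
   PySem.Int.mod (Q ^ 2) mod)

-- helper _lucas_index_plus_one (shared by both Pythons)
def pvLucasPlusOne (U : Int) (V : Int) (P : Int) (Q : Int) (Q1 : Int) (mod : Int) : Int × Int × Int :=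
  (PySem.Int.mod (PySem.Int.floordiv ((P * U + V) * (mod + 1)) 2) mod,
   PySem.Int.mod (PySem.Int.floordiv (((P ^ 2 - 4 * Q1) * U + P * V) * (mod + 1)) 2) mod,
   PySem.Int.mod (Q * Q1) mod)

def lucas_sequence_by_index_py (k : Int) (P : Int) (Q : Int) (mod : Int) : Int × Int × Int :=
  if k = 0 then (0, 2, 1)
  else if k = 1 then (1, P, Q)
  else if k < 0 then (0, 2, 1)  -- totalizing guard only: Python A never terminates for k < 0 (outside Pre_)
  else if PySem.Int.mod k 2 = 0 then
    let r := lucas_sequence_by_index_py (PySem.Int.floordiv k 2) P Q mod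
    pvLucasDouble r.1 r.2.1 r.2.2 mod
  else
    let r := lucas_sequence_by_index_py (k - 1) P Q mod
    pvLucasPlusOne r.1 r.2.1 P r.2.2 Q mod
termination_by k.toNat
decreasing_by
  · have h := PySem.Int.floordiv_eq_ediv_of_pos (a := k) (b := 2) (by omega)
    omega
  · omega

-- ===== PORT B =====
-- the bits of n below its most significant bit, most significant first (bin(k)[3:])
def pvBitsBelow (n : Nat) : List Bool :=
  if n ≤ 1 then []
  else pvBitsBelow (n / 2) ++ [decide (n % 2 = 1)]
termination_by n
decreasing_by omega

-- one iteration of B's loop: double the index, then add one if the bit is set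
def pvLucasStep (P : Int) (Q : Int) (mod : Int) (st : Int × Int × Int) (b : Bool) : Int × Int × Int :=
  let d := pvLucasDouble st.1 st.2.1 st.2.2 mod
  if b then pvLucasPlusOne d.1 d.2.1 P d.2.2 Q mod else d

-- bin(k)[3:]: for k > 0 the bits below the MSB; for k < 0 Python drops '-0b', leaving ALL digits of |k|
def lucas_sequence_by_index_py_alt (k : Int) (P : Int) (Q : Int) (mod : Int) : Int × Int × Int :=
  if k = 0 then (0, 2, 1)
  else
    let bits := if k < 0 then true :: pvBitsBelow (-k).toNat else pvBitsBelow k.toNat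
    bits.foldl (pvLucasStep P Q mod) (1, P, Q)

-- ===== PRECONDITION & SPEC =====
-- Pre_ excludes exactly the inputs on which Python A raises: k < 0 (unbounded recursion,
-- RecursionError) and mod = 0 with k ≥ 2 (ZeroDivisionError); for k ∈ {0,1} A returns without using mod.
def Pre_lucas_sequence_by_index_py (k : Int) (P : Int) (Q : Int) (mod : Int) : Prop :=
  0 ≤ k ∧ (k ≤ 1 ∨ mod ≠ 0)
instance (k : Int) (P : Int) (Q : Int) (mod : Int) : Decidable (Pre_lucas_sequence_by_index_py k P Q mod) := by
  unfold Pre_lucas_sequence_by_index_py; infer_instance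

def pvWitness_lucas_sequence_by_index_py : Int × Int × Int × Int := (10, 3, 5, 7)

def Spec_lucas_sequence_by_index_py (k : Int) (P : Int) (Q : Int) (mod : Int) (out : Int × Int × Int) : Prop := out = lucas_sequence_by_index_py_alt k P Q mod
instance (k : Int) (P : Int) (Q : Int) (mod : Int) (out : Int × Int × Int) : Decidable (Spec_lucas_sequence_by_index_py k P Q mod out) := by unfold Spec_lucas_sequence_by_index_py; infer_instance

-- ===== CLAIM (what is proved, stated in full; the proofs are below) =====
def Claim_equal_lucas_sequence_by_index_py : Prop := ∀ (k : Int) (P : Int) (Q : Int) (mod : Int), Dom_lucas_sequence_by_index_py k P Q mod → Pre_lucas_sequence_by_index_py k P Q mod → Spec_lucas_sequence_by_index_py k P Q mod (lucas_sequence_by_index_py k P Q mod)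

-- ===== LEMMAS AND PROOFS =====

lemma pvBitsBelow_one : pvBitsBelow 1 = [] := by
  rw [pvBitsBelow]; simp

lemma pvBitsBelow_of_ge_two {n : Nat} (h : 2 ≤ n) :
    pvBitsBelow n = pvBitsBelow (n / 2) ++ [decide (n % 2 = 1)] := by
  rw [pvBitsBelow]; simp [Nat.not_le.mpr (by omega : 1 < n)]

lemma pvA_eq_foldl (n : Nat) (hn : 0 < n) (P Q mod : Int) :
    lucas_sequence_by_index_py (n : Int) P Q mod
      = (pvBitsBelow n).foldl (pvLucasStep P Q mod) (1, P, Q) := by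
  induction n using Nat.strong_induction_on with
  | _ n ih =>
    by_cases h1 : n = 1
    · subst h1
      rw [lucas_sequence_by_index_py]
      simp [pvBitsBelow_one]
    · have h2 : 2 ≤ n := by omega
      have hne0 : (n : Int) ≠ 0 := by exact_mod_cast (by omega : n ≠ 0)
      have hne1 : (n : Int) ≠ 1 := by exact_mod_cast h1
      have hnn : ¬ (n : Int) < 0 := by omega
      have hdiv : PySem.Int.floordiv (n : Int) 2 = ((n / 2 : Nat) : Int) := by
        exact_mod_cast PySem.Int.floordiv_natCast n 2
      have hmod : PySem.Int.mod (n : Int) 2 = ((n % 2 : Nat) : Int) := by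
        exact_mod_cast PySem.Int.mod_natCast n 2
      have ihh := ih (n / 2) (by omega) (by omega)
      rw [pvBitsBelow_of_ge_two h2, List.foldl_append]
      by_cases hpar : n % 2 = 0
      · -- even branch
        rw [lucas_sequence_by_index_py]
        simp only [hne0, hne1, hnn, if_false]
        rw [hmod]
        simp only [hpar, Nat.cast_zero, if_true, hdiv, ihh]
        simp [pvLucasStep]
      · -- odd branch: A n = plus_one (A (n-1)) and A (n-1) = double (A ((n-1)/2))
        have hodd : n % 2 = 1 := by omega
        rw [lucas_sequence_by_index_py]
        simp only [if_neg hne0, if_neg hne1, if_neg hnn]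
        rw [hmod]
        have : ((n % 2 : Nat) : Int) ≠ 0 := by simp [hodd]
        rw [if_neg this]
        have hsub : (n : Int) - 1 = ((n - 1 : Nat) : Int) := by omega
        rw [hsub]
        have hne0' : ((n - 1 : Nat) : Int) ≠ 0 := by exact_mod_cast (by omega : n - 1 ≠ 0)
        have hne1' : ((n - 1 : Nat) : Int) ≠ 1 := by exact_mod_cast (by omega : n - 1 ≠ 1)
        have hnn' : ¬ ((n - 1 : Nat) : Int) < 0 := by omega
        rw [lucas_sequence_by_index_py]
        simp only [if_neg hne0', if_neg hne1', if_neg hnn']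
        have hmod' : PySem.Int.mod ((n - 1 : Nat) : Int) 2 = (((n - 1) % 2 : Nat) : Int) := by
          exact_mod_cast PySem.Int.mod_natCast (n - 1) 2
        rw [hmod']
        have hpar' : (n - 1) % 2 = 0 := by omega
        simp only [hpar', Nat.cast_zero, if_true]
        have hdiv' : PySem.Int.floordiv ((n - 1 : Nat) : Int) 2 = (((n - 1) / 2 : Nat) : Int) := by
          exact_mod_cast PySem.Int.floordiv_natCast (n - 1) 2
        rw [hdiv']
        have heq : (n - 1) / 2 = n / 2 := by omega
        rw [heq, ihh]
        simp [pvLucasStep, hodd]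

-- ===== VERDICT (by name: the statement is the Claim_ definition above) =====
theorem lucas_sequence_by_index_py_spec : Claim_equal_lucas_sequence_by_index_py := by
  intro k P Q mod _ hpre
  unfold Spec_lucas_sequence_by_index_py lucas_sequence_by_index_py_alt
  by_cases hk0 : k = 0
  · subst hk0
    rw [lucas_sequence_by_index_py]
    simp
  · rw [if_neg hk0]
    have hk : 0 < k := lt_of_le_of_ne hpre.1 (Ne.symm hk0)
    simp only [if_neg (not_lt.mpr (le_of_lt hk))]
    have hcast : (↑k.toNat : Int) = k := Int.toNat_of_nonneg hpre.1
    rw [← hcast]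
    exact pvA_eq_foldl k.toNat (by omega) P Q mod
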